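-- pv_equiv track=rewrite | github.com/The-Skyy-Rose-Collection-LLC/DevSkyy | backup_1755658634/agent/modules/scanner.py | _analyze_css_file
-- ===== SOURCE A (Python) =====
-- from typing import Dict, Any, List
--
-- def _analyze_css_file(content: str, file_path: str) -> Dict[str, Any]:
--     """Analyze CSS file for performance and best practices."""
--     errors = []
--     warnings = []
--     optimizations = []
--
--     # Check for duplicate properties
--     lines = content.split('\n')
--     properties_in_rule = []
--
--     for line in lines:
--         if '{' in line:
--             properties_in_rule = []
--         elif '}' in line:
--             # Check for duplicates
--             if len(properties_in_rule) != len(set(properties_in_rule)):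
--                 warnings.append("Duplicate CSS properties found")
--             properties_in_rule = []
--         elif ':' in line:
--             prop = line.split(':')[0].strip()
--             properties_in_rule.append(prop)
--
--     return {"errors": errors, "warnings": warnings, "optimizations": optimizations}
-- ===== SOURCE B (Python) =====
-- def _has_duplicate(props):
--     s = sorted(props)
--     return any(a == b for a, b in zip(s, s[1:]))
--
-- def _analyze_css_file(content: str, file_path: str):
--     """Analyze CSS file for performance and best practices.
--
--     Segment-wise recursion instead of a per-line state machine: the line list is
--     consumed one rule segment at a time (properties up to the next delimiter
--     line), and duplicates inside a segment are found by sorting the property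
--     names and scanning for an equal adjacent pair.
--     """
--     warnings = []
--     lines = content.split('\n')
--     i, n = 0, len(lines)
--     while i < n:
--         props = []
--         while i < n and '{' not in lines[i] and '}' not in lines[i]:
--             if ':' in lines[i]:
--                 props.append(lines[i].split(':')[0].strip())
--             i += 1
--         if i < n:
--             # delimiter line: '{' (elif-first in the spec) resets, '}' judges the segment
--             if '{' not in lines[i] and _has_duplicate(props):
--                 warnings.append("Duplicate CSS properties found")
--             i += 1
--     return {"errors": [], "warnings": warnings, "optimizations": []}
-- ===== Notes on version B (the rewrite author's own statement) =====
-- stated objective: alternative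
-- what changed: B replaces A's per-line state machine (a running property list reset/judged by delimiter lines, duplicates by len(list) vs len(set)) with a segment-wise recursion: it repeatedly consumes one whole rule segment up to the next delimiter line, and detects duplicates by sorting the segment's property names and scanning for an equal adjacent pair.
import Mathlib
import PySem

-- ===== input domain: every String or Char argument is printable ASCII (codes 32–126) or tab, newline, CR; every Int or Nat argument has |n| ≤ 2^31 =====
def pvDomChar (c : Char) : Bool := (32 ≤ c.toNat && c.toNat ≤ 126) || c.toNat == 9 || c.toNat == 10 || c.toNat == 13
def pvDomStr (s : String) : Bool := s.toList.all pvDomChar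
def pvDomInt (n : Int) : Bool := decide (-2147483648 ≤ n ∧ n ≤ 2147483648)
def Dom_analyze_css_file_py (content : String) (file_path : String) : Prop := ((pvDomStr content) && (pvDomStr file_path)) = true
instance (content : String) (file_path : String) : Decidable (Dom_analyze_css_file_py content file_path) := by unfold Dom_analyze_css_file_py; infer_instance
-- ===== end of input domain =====

-- B consumes the line list one rule segment at a time (segment-wise recursion instead of
-- A's per-line state machine) and detects duplicates by sorting the segment's property
-- names and scanning for an equal adjacent pair (alternative).

-- ===== PORT A =====
-- A's loop body; state = (warnings, properties_in_rule).
-- line.split(':')[0] is ported as ((split? line ":").getD []).headD "": split? with a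
-- non-empty separator is always 'some' and the result is non-empty, so the defaults never fire.
def cssStepA (st : List String × List String) (line : String) : List String × List String :=
  if PySem.Str.isIn "{" line then (st.1, [])
  else if PySem.Str.isIn "}" line then
    (if st.2.length ≠ (PySem.Set.ofList st.2).length
       then st.1 ++ ["Duplicate CSS properties found"] else st.1, [])
  else if PySem.Str.isIn ":" line then
    (st.1, st.2 ++ [PySem.Str.strip (((PySem.Str.split? line ":").getD []).headD "")])
  else st

def analyze_css_file_py (content : String) (file_path : String) : List (String × List String) :=
  -- content.split('\n'): separator non-empty, so split? is always 'some'
  let lines := (PySem.Str.split? content "\n").getD []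
  let st := lines.foldl cssStepA ([], [])
  [("errors", []), ("warnings", st.1), ("optimizations", [])]

-- ===== PORT B =====
-- line.split(':')[0].strip(), as in port A
def cssPropOf (line : String) : String :=
  PySem.Str.strip (((PySem.Str.split? line ":").getD []).headD "")

-- _has_duplicate: sorted(props), then any adjacent equal pair (zip(s, s[1:]))
def cssHasDup (props : List String) : Bool :=
  let s := PySem.List.sorted props (fun x => x) false
  (s.zip s.tail).any (fun p => p.1 == p.2)

-- the inner while loop: one segment = (its property names, the rest of the lines
-- starting at the delimiter line that stopped the inner loop)
def cssSeg : List String → List String × List String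
  | [] => ([], [])
  | l :: ls =>
    if PySem.Str.isIn "{" l || PySem.Str.isIn "}" l then ([], l :: ls)
    else ((if PySem.Str.isIn ":" l then [cssPropOf l] else []) ++ (cssSeg ls).1, (cssSeg ls).2)

theorem cssSeg_rest_length : ∀ ls : List String, (cssSeg ls).2.length ≤ ls.length := by
  intro ls
  induction ls with
  | nil => simp [cssSeg]
  | cons l ls ih =>
    simp only [cssSeg]
    split
    · simp
    · simpa using Nat.le_succ_of_le ih

-- the outer while loop: segment at a time
def cssScan (lines : List String) : List String :=
  match h : cssSeg lines with
  | (_, []) => []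
  | (ps, d :: rest) =>
      (if !PySem.Str.isIn "{" d && cssHasDup ps
        then ["Duplicate CSS properties found"] else []) ++ cssScan rest
termination_by lines.length
decreasing_by
  have := cssSeg_rest_length lines
  rw [h] at this
  simp at this
  omega

def analyze_css_file_py_alt (content : String) (file_path : String) : List (String × List String) :=
  [("errors", []), ("warnings", cssScan ((PySem.Str.split? content "\n").getD [])), ("optimizations", [])]

-- ===== PRECONDITION & SPEC =====
def Spec_analyze_css_file_py (content : String) (file_path : String) (out : List (String × List String)) : Prop := out = analyze_css_file_py_alt content file_path
instance (content : String) (file_path : String) (out : List (String × List String)) : Decidable (Spec_analyze_css_file_py content file_path out) := by unfold Spec_analyze_css_file_py; infer_instance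

-- ===== CLAIM (what is proved, stated in full; the proofs are below) =====
def Claim_equal_analyze_css_file_py : Prop := ∀ (content : String) (file_path : String), Dom_analyze_css_file_py content file_path → Spec_analyze_css_file_py content file_path (analyze_css_file_py content file_path)

-- ===== LEMMAS AND PROOFS =====

theorem ofList_append_singleton {α : Type} [BEq α] (xs : List α) (x : α) :
    PySem.Set.ofList (xs ++ [x]) = PySem.Set.add (PySem.Set.ofList xs) x := by
  simp [PySem.Set.ofList_eq_foldl, List.foldl_append]

theorem length_ofList_eq_iff_nodup {α : Type} [BEq α] [LawfulBEq α] (xs : List α) :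
    (PySem.Set.ofList xs).length = xs.length ↔ xs.Nodup := by
  induction xs using List.reverseRecOn with
  | nil => simp
  | append_singleton xs x ih =>
    rw [ofList_append_singleton]
    have hle := PySem.Set.length_ofList_le (α := α) xs
    by_cases hmem : x ∈ xs
    · have hc : PySem.Set.contains (PySem.Set.ofList xs) x = true := by
        simp [PySem.Set.mem_ofList, hmem]
      rw [PySem.Set.add, if_pos hc]
      have hnd : ¬ (xs ++ [x]).Nodup := by
        rw [List.nodup_append]
        rintro ⟨-, -, hd⟩
        exact hd x hmem x (List.mem_singleton_self x) rfl
      simp only [List.length_append, List.length_singleton]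
      constructor
      · intro h; omega
      · intro h; exact absurd h hnd
    · have hc : ¬ PySem.Set.contains (PySem.Set.ofList xs) x = true := by
        simp [PySem.Set.mem_ofList, hmem]
      rw [PySem.Set.add, if_neg hc]
      rw [List.nodup_append]
      simp only [List.length_append, List.length_singleton, List.nodup_singleton]
      constructor
      · intro h
        exact ⟨ih.1 (by omega), trivial,
          fun a ha b hb => by simp at hb; subst hb; exact fun e => hmem (e ▸ ha)⟩
      · rintro ⟨h, -, -⟩
        have := ih.2 h; omega

-- in a ≤-sorted list, an equal adjacent pair exists iff the list has a duplicate
theorem adj_dup_of_pairwise (s : List String) (hp : s.Pairwise (· ≤ ·)) :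
    ((s.zip s.tail).any (fun p => p.1 == p.2)) = true ↔ ¬ s.Nodup := by
  induction s with
  | nil => simp
  | cons x t ih =>
    cases t with
    | nil => simp
    | cons y u =>
      have hp' : (y :: u).Pairwise (· ≤ ·) := hp.tail
      have hxle : ∀ z ∈ y :: u, x ≤ z := fun z hz => (List.pairwise_cons.1 hp).1 z hz
      rw [List.tail_cons] at ih
      simp only [List.tail_cons, List.zip_cons_cons, List.any_cons, Bool.or_eq_true,
        beq_iff_eq]
      rw [ih hp']
      constructor
      · rintro (h | h)
        · subst h
          intro hnd
          exact (List.nodup_cons.1 hnd).1 (List.mem_cons_self ..)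
        · intro hnd
          exact h (List.nodup_cons.1 hnd).2
      · intro h
        by_cases hxy : x = y
        · exact Or.inl hxy
        · right
          intro hnd2
          apply h
          rw [List.nodup_cons]
          refine ⟨fun hmem => ?_, hnd2⟩
          rcases List.mem_cons.1 hmem with h1 | h1
          · exact hxy h1
          · exact hxy (le_antisymm (hxle y (List.mem_cons_self ..))
              ((List.pairwise_cons.1 hp').1 x h1))

theorem cssHasDup_iff (props : List String) : cssHasDup props = true ↔ ¬ props.Nodup := by
  unfold cssHasDup
  have hperm : (PySem.List.sorted props (fun x => x) false).Perm props :=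
    PySem.List.sorted_perm props (fun x => x) false
  rw [adj_dup_of_pairwise _ (PySem.List.sorted_pairwise props (fun x => x))]
  exact not_congr hperm.nodup_iff

-- A's fold over one segment: only the property lines act, and they append cssPropOf
theorem fold_seg (lines : List String) : ∀ w acc : List String,
    lines.foldl cssStepA (w, acc) =
      (cssSeg lines).2.foldl cssStepA (w, acc ++ (cssSeg lines).1) := by
  induction lines with
  | nil => simp [cssSeg]
  | cons l ls ih =>
    intro w acc
    by_cases hd : (PySem.Str.isIn "{" l || PySem.Str.isIn "}" l) = true
    · unfold cssSeg
      rw [if_pos hd]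
      simp
    · have h1 : ¬ PySem.Str.isIn "{" l = true := fun h => hd (by rw [h, Bool.true_or])
      have h2 : ¬ PySem.Str.isIn "}" l = true := fun h => hd (by rw [h, Bool.or_true])
      unfold cssSeg
      rw [if_neg hd]
      simp only [List.foldl_cons]
      have hstep : cssStepA (w, acc) l =
          (w, acc ++ (if PySem.Str.isIn ":" l then [cssPropOf l] else [])) := by
        unfold cssStepA cssPropOf
        rw [if_neg h1, if_neg h2]
        split <;> simp
      rw [hstep, ih]
      simp [List.append_assoc]

-- the head of cssSeg's rest is a delimiter line
theorem cssSeg_rest_delim : ∀ lines ps d rest, cssSeg lines = (ps, d :: rest) →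
    (PySem.Str.isIn "{" d || PySem.Str.isIn "}" d) = true := by
  intro lines
  induction lines with
  | nil => intro ps d rest h; simp [cssSeg] at h
  | cons l ls ih =>
    intro ps d rest h
    by_cases hd : (PySem.Str.isIn "{" l || PySem.Str.isIn "}" l) = true
    · unfold cssSeg at h
      rw [if_pos hd] at h
      injection h with hA hB
      injection hB with hl _
      exact hl ▸ hd
    · unfold cssSeg at h
      rw [if_neg hd] at h
      injection h with hA hB
      exact ih (cssSeg ls).1 d rest (by rw [← hB])

-- unfolding equations for cssScan (well-founded recursion)
theorem cssScan_eq_nil (lines ps : List String) (h : cssSeg lines = (ps, [])) :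
    cssScan lines = [] := by
  rw [cssScan.eq_def]
  split
  · rfl
  · rename_i heq
    rw [h] at heq
    cases heq

theorem cssScan_eq_cons (lines ps rest : List String) (d : String)
    (h : cssSeg lines = (ps, d :: rest)) :
    cssScan lines =
      (if !PySem.Str.isIn "{" d && cssHasDup ps
        then ["Duplicate CSS properties found"] else []) ++ cssScan rest := by
  rw [cssScan.eq_def]
  split
  · rename_i heq
    rw [h] at heq
    cases heq
  · rename_i heq
    rw [h] at heq
    injection heq with e1 e2
    injection e2 with e3 e4
    rw [e1, e3, e4]

-- the main invariant: A's fold from (w, []) produces w ++ cssScan lines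
theorem fold_eq_scan : ∀ n lines, lines.length ≤ n → ∀ w : List String,
    (lines.foldl cssStepA (w, [])).1 = w ++ cssScan lines := by
  intro n
  induction n with
  | zero =>
    intro lines hlen w
    cases lines with
    | nil => rw [cssScan_eq_nil [] [] rfl]; simp
    | cons l ls => simp at hlen
  | succ n ih =>
    intro lines hlen w
    rw [fold_seg]
    cases hsg : cssSeg lines with
    | mk ps rest =>
      cases rest with
      | nil =>
        rw [cssScan_eq_nil lines ps hsg]
        simp
      | cons d rest' =>
        have hlen' : rest'.length ≤ n := by
          have := cssSeg_rest_length lines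
          rw [hsg] at this
          simp at this
          omega
        have hdelim := cssSeg_rest_delim lines ps d rest' hsg
        rw [cssScan_eq_cons lines ps rest' d hsg]
        simp only [List.foldl_cons, List.nil_append]
        by_cases hbr : PySem.Str.isIn "{" d = true
        · have hstep : cssStepA (w, ps) d = (w, []) := by
            unfold cssStepA
            rw [if_pos hbr]
          rw [hstep, ih rest' hlen' w, hbr]
          simp
        · have hcl : PySem.Str.isIn "}" d = true := by
            rcases Bool.or_eq_true_iff.1 hdelim with h | h
            · exact absurd h hbr
            · exact h
          have hdup : (ps.length ≠ (PySem.Set.ofList ps).length) ↔ cssHasDup ps = true := by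
            rw [cssHasDup_iff]
            constructor
            · intro h hnd
              exact h ((length_ofList_eq_iff_nodup ps).2 hnd).symm
            · intro h he
              exact h ((length_ofList_eq_iff_nodup ps).1 he.symm)
          have hstep : cssStepA (w, ps) d =
              (w ++ (if cssHasDup ps then ["Duplicate CSS properties found"] else []), []) := by
            unfold cssStepA
            rw [if_neg hbr, if_pos hcl]
            by_cases hh : cssHasDup ps = true
            · rw [if_pos (hdup.2 hh), if_pos hh]
            · rw [if_neg (fun hc => hh (hdup.1 hc)), if_neg hh]
              simp
          rw [hstep, ih rest' hlen' _]
          have hbr' : PySem.Str.isIn "{" d = false := by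
            cases hx : PySem.Str.isIn "{" d
            · rfl
            · exact absurd hx hbr
          rw [hbr']
          by_cases hh : cssHasDup ps = true <;> simp [hh]

-- ===== VERDICT (by name: the statement is the Claim_ definition above) =====
theorem analyze_css_file_py_spec : Claim_equal_analyze_css_file_py := by
  intro content file_path _
  unfold Spec_analyze_css_file_py analyze_css_file_py analyze_css_file_py_alt
  have h := fold_eq_scan ((PySem.Str.split? content "\n").getD []).length _ le_rfl []
  simp only [List.nil_append] at h
  simp [h]
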